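-- pv_equiv track=rewrite | github.com/dragneel786/leetcode_practise | 1184-distance-between-bus-stops/1184-distance-between-bus-stops.py | distanceBetweenBusStops
-- ===== SOURCE A (Python) =====
-- from typing import List
--
-- def distanceBetweenBusStops(distance: List[int], start: int, destination: int) -> int:
--     n = len(distance)
--     d1 = d2 = start
--     ans1 = ans2 = 0
--     while(d1 != destination):
--         ans1 += distance[d1]
--         d1 = (d1 + 1) % n
--
--     while(d2 != destination):
--         d2 = d2 - 1 if(d2) else n - 1
--         ans2 += distance[d2]
--
--     return min(ans1, ans2)
-- ===== SOURCE B (Python) =====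
-- def distanceBetweenBusStops(distance, start, destination):
--     if start == destination:
--         return 0
--     prefix = [0]
--     for d in distance:
--         prefix.append(prefix[-1] + d)
--     lo, hi = (start, destination) if start < destination else (destination, start)
--     seg = prefix[hi] - prefix[lo]
--     return min(seg, prefix[-1] - seg)
-- ===== Notes on version B (the rewrite author's own statement) =====
-- stated objective: alternative
-- what changed: Replaces the two directional step-by-step walks (index arithmetic with modular wraparound) by one pass that builds a prefix-sum table; the forward arc is then a single O(1) difference prefix[hi]-prefix[lo] and the answer is min(seg, total - seg), since the two arcs partition the circle.
import Mathlib
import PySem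

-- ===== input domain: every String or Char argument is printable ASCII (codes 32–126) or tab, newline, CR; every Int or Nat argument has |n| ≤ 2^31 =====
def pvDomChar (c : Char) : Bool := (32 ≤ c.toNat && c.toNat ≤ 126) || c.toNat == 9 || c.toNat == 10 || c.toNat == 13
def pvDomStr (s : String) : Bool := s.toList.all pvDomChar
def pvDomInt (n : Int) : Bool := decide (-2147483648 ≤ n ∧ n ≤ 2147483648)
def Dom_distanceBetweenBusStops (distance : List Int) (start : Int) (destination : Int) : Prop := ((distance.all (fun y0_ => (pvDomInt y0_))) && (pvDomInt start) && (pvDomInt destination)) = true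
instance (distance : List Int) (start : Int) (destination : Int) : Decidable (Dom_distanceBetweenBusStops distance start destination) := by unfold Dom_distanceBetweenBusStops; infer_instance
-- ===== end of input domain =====

-- B replaces A's two directional step-by-step walks by a one-pass prefix-sum table:
-- the forward arc is prefix[hi] - prefix[lo] and the answer is min(seg, total - seg),
-- since the two arcs partition the circle; objective: alternative. Return values only; no mutation.

-- ===== PORT A =====
-- first while loop: walk forward from d1 to destination, summing distance[d1]
-- (fuel-bounded recursion; inside Pre_ the loop takes < distance.length steps, so fuel never runs out)
def pvLoop1 (distance : List Int) (destination n : Int) : Nat → Int → Int → Int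
  | 0, _, ans => ans
  | fuel+1, d1, ans =>
    if d1 = destination then ans
    else pvLoop1 distance destination n fuel (PySem.Int.mod (d1 + 1) n)
        (ans + (PySem.List.pyGet? distance d1).getD 0)

-- second while loop: step d2 backward (with wraparound) then add distance[d2]
def pvLoop2 (distance : List Int) (destination n : Int) : Nat → Int → Int → Int
  | 0, _, ans => ans
  | fuel+1, d2, ans =>
    if d2 = destination then ans
    else
      let d2' := if d2 ≠ 0 then d2 - 1 else n - 1
      pvLoop2 distance destination n fuel d2' (ans + (PySem.List.pyGet? distance d2').getD 0)

def distanceBetweenBusStops (distance : List Int) (start : Int) (destination : Int) : Int :=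
  let n : Int := distance.length
  min (pvLoop1 distance destination n distance.length start 0)
      (pvLoop2 distance destination n distance.length start 0)

-- ===== PORT B =====
def distanceBetweenBusStops_alt (distance : List Int) (start : Int) (destination : Int) : Int :=
  if start = destination then 0
  else
    -- 'pref' is Source B's 'prefix' ('prefix' is a Lean keyword)
    let pref := distance.foldl (fun p d => p ++ [(PySem.List.pyGet? p (-1)).getD 0 + d]) [0]
    let lohi := if start < destination then (start, destination) else (destination, start)
    let seg := (PySem.List.pyGet? pref lohi.2).getD 0 - (PySem.List.pyGet? pref lohi.1).getD 0
    min seg ((PySem.List.pyGet? pref (-1)).getD 0 - seg)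

-- ===== PRECONDITION & SPEC =====
-- Pre_ excludes exactly the inputs on which A does not return: an out-of-range start or
-- destination (with start ≠ destination) makes A's loops raise IndexError or never terminate
-- (B itself raises IndexError on most of these inputs: the prefix-table lookup is out of range).
def Pre_distanceBetweenBusStops (distance : List Int) (start : Int) (destination : Int) : Prop :=
  start = destination ∨
    (0 ≤ start ∧ start < distance.length ∧ 0 ≤ destination ∧ destination < distance.length)
instance (distance : List Int) (start : Int) (destination : Int) : Decidable (Pre_distanceBetweenBusStops distance start destination) := by unfold Pre_distanceBetweenBusStops; infer_instance

def pvWitness_distanceBetweenBusStops : List Int × Int × Int := ([7, 10, 1, 3], 0, 2)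

def Spec_distanceBetweenBusStops (distance : List Int) (start : Int) (destination : Int) (out : Int) : Prop := out = distanceBetweenBusStops_alt distance start destination
instance (distance : List Int) (start : Int) (destination : Int) (out : Int) : Decidable (Spec_distanceBetweenBusStops distance start destination out) := by unfold Spec_distanceBetweenBusStops; infer_instance

-- ===== CLAIM (what is proved, stated in full; the proofs are below) =====
def Claim_equal_distanceBetweenBusStops : Prop := ∀ (distance : List Int) (start : Int) (destination : Int), Dom_distanceBetweenBusStops distance start destination → Pre_distanceBetweenBusStops distance start destination → Spec_distanceBetweenBusStops distance start destination (distanceBetweenBusStops distance start destination)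

-- ===== LEMMAS AND PROOFS =====

-- prefix sum of the first i entries
def pvSumTo (distance : List Int) (i : Nat) : Int := (distance.take i).sum

-- forward arc sum from d to t (indices < distance.length)
def pvFwd (distance : List Int) (t d : Nat) : Int :=
  if d ≤ t then pvSumTo distance t - pvSumTo distance d
  else distance.sum - (pvSumTo distance d - pvSumTo distance t)

-- backward arc sum from d down to t
def pvBwd (distance : List Int) (t d : Nat) : Int :=
  if t ≤ d then pvSumTo distance d - pvSumTo distance t
  else distance.sum - (pvSumTo distance t - pvSumTo distance d)

-- remaining iterations of the forward (resp. backward) walk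
def pvStepsF (len t d : Nat) : Nat := if d ≤ t then t - d else t + len - d
def pvStepsB (len t d : Nat) : Nat := if t ≤ d then d - t else d + len - t

lemma pvSumTo_succ (distance : List Int) (d : Nat) (hd : d < distance.length) :
    pvSumTo distance (d + 1) = pvSumTo distance d + distance[d] := by
  unfold pvSumTo
  rw [List.take_add_one, List.sum_append]
  simp [List.getElem?_eq_getElem hd]

lemma pvSumTo_len (distance : List Int) : pvSumTo distance distance.length = distance.sum := by
  simp [pvSumTo]

lemma pvSumTo_zero (distance : List Int) : pvSumTo distance 0 = 0 := by
  simp [pvSumTo]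

lemma pvFwd_self (distance : List Int) (t : Nat) : pvFwd distance t t = 0 := by
  simp [pvFwd]

lemma pvBwd_self (distance : List Int) (t : Nat) : pvBwd distance t t = 0 := by
  simp [pvBwd]

lemma pvFwd_step (distance : List Int) (t d : Nat) (ht : t < distance.length)
    (hd : d < distance.length) (hdt : d ≠ t) :
    pvFwd distance t d = distance[d] + pvFwd distance t ((d + 1) % distance.length) := by
  by_cases hlen : d + 1 = distance.length
  · have hm : (d + 1) % distance.length = 0 := by rw [hlen, Nat.mod_self]
    have htot : distance.sum = pvSumTo distance d + distance[d] := by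
      rw [← pvSumTo_len, ← hlen, pvSumTo_succ _ _ hd]
    rw [hm]
    unfold pvFwd
    rw [if_neg (by omega), if_pos (Nat.zero_le t), pvSumTo_zero]
    omega
  · have hm : (d + 1) % distance.length = d + 1 := Nat.mod_eq_of_lt (by omega)
    rw [hm]
    unfold pvFwd
    rcases Nat.lt_or_ge d t with h | h
    · rw [if_pos (by omega), if_pos (by omega), pvSumTo_succ _ _ hd]
      omega
    · rw [if_neg (by omega), if_neg (by omega), pvSumTo_succ _ _ hd]
      omega

lemma pvBwd_step (distance : List Int) (t d d' : Nat) (ht : t < distance.length)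
    (hd : d < distance.length) (hdt : d ≠ t)
    (h' : (d = 0 ∧ d' = distance.length - 1) ∨ (d ≠ 0 ∧ d' = d - 1))
    (hd'lt : d' < distance.length) :
    pvBwd distance t d = distance[d']'hd'lt + pvBwd distance t d' := by
  rcases h' with ⟨h0, rfl⟩ | ⟨h0, rfl⟩
  · subst h0
    have hlast : distance[distance.length - 1]'(by omega)
        = distance.sum - pvSumTo distance (distance.length - 1) := by
      have := pvSumTo_succ distance (distance.length - 1) (by omega)
      rw [show distance.length - 1 + 1 = distance.length by omega, pvSumTo_len] at this
      omega
    unfold pvBwd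
    rw [if_neg (by omega), if_pos (by omega), pvSumTo_zero, hlast]
    omega
  · have hstep : pvSumTo distance d = pvSumTo distance (d - 1) + distance[d - 1]'(by omega) := by
      have := pvSumTo_succ distance (d - 1) (by omega)
      rw [show d - 1 + 1 = d by omega] at this
      omega
    unfold pvBwd
    rcases Nat.lt_or_ge t d with h | h
    · rw [if_pos (by omega), if_pos (by omega)]
      omega
    · rw [if_neg (by omega), if_neg (by omega)]
      omega

lemma pvStepsF_step (len t d : Nat) (ht : t < len) (hd : d < len) (hdt : d ≠ t) :
    pvStepsF len t ((d + 1) % len) + 1 = pvStepsF len t d := by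
  have hm : (d + 1) % len = if d + 1 = len then 0 else d + 1 := by
    by_cases h : d + 1 = len
    · rw [h, Nat.mod_self, if_pos rfl]
    · rw [Nat.mod_eq_of_lt (by omega), if_neg h]
  rw [hm]
  unfold pvStepsF
  split_ifs <;> omega

lemma pvStepsB_step (len t d d' : Nat) (ht : t < len) (hd : d < len) (hdt : d ≠ t)
    (h' : (d = 0 ∧ d' = len - 1) ∨ (d ≠ 0 ∧ d' = d - 1)) :
    pvStepsB len t d' + 1 = pvStepsB len t d := by
  rcases h' with ⟨h0, rfl⟩ | ⟨h0, rfl⟩ <;> unfold pvStepsB <;> split_ifs <;> omega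

lemma pvLoop1_eq (distance : List Int) (t : Nat) (ht : t < distance.length) :
    ∀ (fuel d : Nat) (ans : Int), d < distance.length →
      pvStepsF distance.length t d ≤ fuel →
      pvLoop1 distance (t : Int) (distance.length : Int) fuel (d : Int) ans
        = ans + pvFwd distance t d := by
  intro fuel
  induction fuel with
  | zero =>
    intro d ans hd hf
    have hdt : d = t := by unfold pvStepsF at hf; split at hf <;> omega
    subst hdt
    rw [pvLoop1, pvFwd_self]
    ring
  | succ fuel ih =>
    intro d ans hd hf
    by_cases hdt : d = t
    · subst hdt
      rw [pvLoop1, if_pos rfl, pvFwd_self]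
      ring
    · have hne : (d : Int) ≠ (t : Int) := by exact_mod_cast hdt
      rw [pvLoop1, if_neg hne]
      have hmod : PySem.Int.mod ((d : Int) + 1) ((distance.length : Nat) : Int)
          = (((d + 1) % distance.length : Nat) : Int) := by
        rw [show ((d : Int) + 1) = (((d + 1 : Nat)) : Int) by push_cast; ring]
        exact PySem.Int.mod_natCast _ _
      have hget : (PySem.List.pyGet? distance (d : Int)).getD 0 = distance[d] := by
        simp [PySem.List.pyGet?_natCast, List.getElem?_eq_getElem hd]
      rw [hmod, hget,
        ih ((d + 1) % distance.length) _ (Nat.mod_lt _ (by omega))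
          (by have := pvStepsF_step distance.length t d ht hd hdt; omega),
        pvFwd_step distance t d ht hd hdt]
      ring

lemma pvLoop2_eq (distance : List Int) (t : Nat) (ht : t < distance.length) :
    ∀ (fuel d : Nat) (ans : Int), d < distance.length →
      pvStepsB distance.length t d ≤ fuel →
      pvLoop2 distance (t : Int) (distance.length : Int) fuel (d : Int) ans
        = ans + pvBwd distance t d := by
  intro fuel
  induction fuel with
  | zero =>
    intro d ans hd hf
    have hdt : d = t := by unfold pvStepsB at hf; split at hf <;> omega
    subst hdt
    rw [pvLoop2, pvBwd_self]
    ring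
  | succ fuel ih =>
    intro d ans hd hf
    by_cases hdt : d = t
    · subst hdt
      rw [pvLoop2, if_pos rfl, pvBwd_self]
      ring
    · have hne : (d : Int) ≠ (t : Int) := by exact_mod_cast hdt
      rw [pvLoop2, if_neg hne]
      set d' : Nat := if d = 0 then distance.length - 1 else d - 1 with hd'
      have hcase : (d = 0 ∧ d' = distance.length - 1) ∨ (d ≠ 0 ∧ d' = d - 1) := by
        by_cases h0 : d = 0
        · exact Or.inl ⟨h0, by rw [hd', if_pos h0]⟩
        · exact Or.inr ⟨h0, by rw [hd', if_neg h0]⟩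
      have hstep : (if (d : Int) ≠ 0 then (d : Int) - 1 else ((distance.length : Nat) : Int) - 1)
          = ((d' : Nat) : Int) := by
        rcases hcase with ⟨h0, he⟩ | ⟨h0, he⟩
        · subst h0; rw [he]; simp; omega
        · rw [if_pos (by exact_mod_cast h0), he]; omega
      have hd'lt : d' < distance.length := by rcases hcase with ⟨_, he⟩ | ⟨h0, he⟩ <;> omega
      have hget : (PySem.List.pyGet? distance ((d' : Nat) : Int)).getD 0
          = distance[d']'hd'lt := by
        simp [PySem.List.pyGet?_natCast, List.getElem?_eq_getElem hd'lt]
      rw [hstep]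
      show pvLoop2 distance (t : Int) (distance.length : Int) fuel ((d' : Nat) : Int)
          (ans + (PySem.List.pyGet? distance ((d' : Nat) : Int)).getD 0) = ans + pvBwd distance t d
      rw [hget,
        ih d' _ hd'lt
          (by have := pvStepsB_step distance.length t d d' ht hd hdt hcase; omega),
        pvBwd_step distance t d d' ht hd hdt hcase hd'lt]
      ring

lemma pvLoop1_self (distance : List Int) (d n : Int) (fuel : Nat) :
    pvLoop1 distance d n fuel d 0 = 0 := by
  cases fuel <;> simp [pvLoop1]

lemma pvLoop2_self (distance : List Int) (d n : Int) (fuel : Nat) :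
    pvLoop2 distance d n fuel d 0 = 0 := by
  cases fuel <;> simp [pvLoop2]

lemma pvPrefix_eq (distance : List Int) :
    distance.foldl (fun p d => p ++ [(PySem.List.pyGet? p (-1)).getD 0 + d]) [0]
      = (List.range (distance.length + 1)).map (pvSumTo distance) := by
  induction distance using List.reverseRecOn with
  | nil => simp [pvSumTo]
  | append_singleton l d ihl =>
    rw [List.foldl_append, ihl]
    have hlen : ((List.range (l.length + 1)).map (pvSumTo l)).length = l.length + 1 := by
      simp
    have hlast : (PySem.List.pyGet? ((List.range (l.length + 1)).map (pvSumTo l)) (-1)).getD 0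
        = pvSumTo l l.length := by
      rw [PySem.List.pyGet?_neg_ofNat _ 1 (by omega) (by omega)]
      rw [hlen]
      simp
    have hmapcongr : (List.range (l.length + 1)).map (pvSumTo (l ++ [d]))
        = (List.range (l.length + 1)).map (pvSumTo l) := by
      apply List.map_congr_left
      intro i hi
      have hi' : i ≤ l.length := by simpa [Nat.lt_succ_iff] using hi
      unfold pvSumTo
      rw [List.take_append_of_le_length hi']
    have hnew : pvSumTo (l ++ [d]) (l.length + 1) = pvSumTo l l.length + d := by
      unfold pvSumTo
      rw [show l.length + 1 = (l ++ [d]).length by simp, List.take_length, List.sum_append,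
        List.take_length]
      simp
    have hstep : List.foldl (fun p d => p ++ [(PySem.List.pyGet? p (-1)).getD 0 + d])
        (List.map (pvSumTo l) (List.range (l.length + 1))) [d]
        = List.map (pvSumTo l) (List.range (l.length + 1)) ++ [pvSumTo l l.length + d] := by
      simp only [List.foldl_cons, List.foldl_nil, hlast]
    have hrhs : List.map (pvSumTo (l ++ [d])) (List.range (l.length + 1 + 1))
        = List.map (pvSumTo l) (List.range (l.length + 1)) ++ [pvSumTo l l.length + d] := by
      rw [List.range_succ, List.map_append, hmapcongr]
      simp [hnew]
    rw [hstep, show (l ++ [d]).length = l.length + 1 by simp, hrhs]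

lemma pvPrefix_get (distance : List Int) (i : Nat) (hi : i ≤ distance.length) :
    (PySem.List.pyGet? ((List.range (distance.length + 1)).map (pvSumTo distance)) (i : Int)).getD 0
      = pvSumTo distance i := by
  rw [PySem.List.pyGet?_natCast]
  simp [List.getElem?_map, List.getElem?_range (show i < distance.length + 1 by omega)]

lemma pvPrefix_last (distance : List Int) :
    (PySem.List.pyGet? ((List.range (distance.length + 1)).map (pvSumTo distance)) (-1)).getD 0
      = distance.sum := by
  have hlen : ((List.range (distance.length + 1)).map (pvSumTo distance)).length
      = distance.length + 1 := by simp
  rw [PySem.List.pyGet?_neg_ofNat _ 1 (by omega) (by omega), hlen]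
  simp [pvSumTo_len]

-- ===== VERDICT (by name: the statement is the Claim_ definition above) =====
theorem distanceBetweenBusStops_spec : Claim_equal_distanceBetweenBusStops := by
  intro distance start destination hdom hpre
  unfold Spec_distanceBetweenBusStops
  by_cases heq : start = destination
  · subst heq
    simp [distanceBetweenBusStops, distanceBetweenBusStops_alt, pvLoop1_self, pvLoop2_self]
  · rcases hpre with h | ⟨hs0, hsl, ht0, htl⟩
    · exact absurd h heq
    obtain ⟨s, rfl⟩ : ∃ s : Nat, start = (s : Int) := ⟨start.toNat, (Int.toNat_of_nonneg hs0).symm⟩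
    obtain ⟨t, rfl⟩ : ∃ t : Nat, destination = (t : Int) :=
      ⟨destination.toNat, (Int.toNat_of_nonneg ht0).symm⟩
    have hs : s < distance.length := by exact_mod_cast hsl
    have ht : t < distance.length := by exact_mod_cast htl
    have hst : s ≠ t := fun h => heq (by exact_mod_cast h)
    have h1 := pvLoop1_eq distance t ht distance.length s 0 hs
      (by unfold pvStepsF; split <;> omega)
    have h2 := pvLoop2_eq distance t ht distance.length s 0 hs
      (by unfold pvStepsB; split <;> omega)
    simp only [distanceBetweenBusStops, h1, h2, zero_add]
    unfold distanceBetweenBusStops_alt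
    rw [if_neg heq]
    simp only [pvPrefix_eq]
    rcases Nat.lt_or_ge s t with hlt | hge
    · have : ((s : Int) < (t : Int)) := by exact_mod_cast hlt
      simp only [if_pos this]
      rw [pvPrefix_get distance t (by omega), pvPrefix_get distance s (by omega),
        pvPrefix_last distance]
      unfold pvFwd pvBwd
      rw [if_pos (by omega), if_neg (by omega)]
    · have hts : t < s := by omega
      have : ¬ ((s : Int) < (t : Int)) := by exact_mod_cast Nat.not_lt.mpr hge
      simp only [if_neg this]
      rw [pvPrefix_get distance s (by omega), pvPrefix_get distance t (by omega),
        pvPrefix_last distance]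
      unfold pvFwd pvBwd
      rw [if_neg (by omega), if_pos (by omega), min_comm]
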